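-- pv_equiv track=rewrite | github.com/Ajinkya-png/test | app/routers/voice.py | is_plausible_address
-- ===== SOURCE A (Python) =====
-- def is_plausible_address(address: str) -> bool:
--     """Very lenient address validation for demo"""
--     if len(address) < 10:
--         return False
--
--     has_number = any(char.isdigit() for char in address)
--     has_letters = any(char.isalpha() for char in address)
--
--     if not has_number or not has_letters:
--         return False
--
--     word_count = len(address.split())
--     if word_count >= 3:
--         return True
--
--     return len(address) > 15
-- ===== SOURCE B (Python) =====
-- def is_plausible_address(address: str) -> bool:
--     """Single pass over the characters: digit/letter flags plus a word counter
--     driven by whitespace->non-whitespace transitions (no split, no extra lists)."""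
--     if len(address) < 10:
--         return False
--     has_number = False
--     has_letters = False
--     word_count = 0
--     prev_space = True
--     for char in address:
--         if char.isdigit():
--             has_number = True
--         if char.isalpha():
--             has_letters = True
--         sp = char.isspace()
--         if not sp and prev_space:
--             word_count += 1
--         prev_space = sp
--     if not has_number or not has_letters:
--         return False
--     if word_count >= 3:
--         return True
--     return len(address) > 15
-- ===== Notes on version B (the rewrite author's own statement) =====
-- stated objective: alternative
-- what changed: Replaces the three separate traversals (any(isdigit), any(isalpha), len(split())) with one linear pass that keeps two flags and counts whitespace-to-non-whitespace transitions instead of materialising the split word list.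
import Mathlib
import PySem

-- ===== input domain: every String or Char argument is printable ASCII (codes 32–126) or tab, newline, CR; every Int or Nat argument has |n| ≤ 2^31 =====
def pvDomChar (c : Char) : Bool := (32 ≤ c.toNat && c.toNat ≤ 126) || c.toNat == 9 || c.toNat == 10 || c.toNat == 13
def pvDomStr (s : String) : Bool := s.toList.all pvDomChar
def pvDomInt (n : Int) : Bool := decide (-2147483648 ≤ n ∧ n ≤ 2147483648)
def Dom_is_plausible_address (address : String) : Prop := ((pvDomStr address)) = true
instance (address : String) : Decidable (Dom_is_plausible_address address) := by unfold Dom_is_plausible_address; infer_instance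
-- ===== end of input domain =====

-- B replaces A's three traversals (any isdigit, any isalpha, len(split())) by one
-- linear pass counting whitespace->non-whitespace transitions; same return value.

-- ===== PORT A =====
def is_plausible_address (address : String) : Bool :=
  if PySem.Str.len address < 10 then false
  else
    let has_number := address.toList.any PySem.Chars.isdigit
    let has_letters := address.toList.any PySem.Chars.isalpha
    if !has_number || !has_letters then false
    else
      let word_count := (PySem.Str.split₀ address).length
      if word_count ≥ 3 then true
      else decide (PySem.Str.len address > 15)

-- ===== PORT B =====
-- the single for-loop of Source B: flags, word counter, previous-char-was-space state
def pvAltLoop : List Char → Bool → Bool → Nat → Bool → Bool × Bool × Nat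
  | [], hn, hl, wc, _ => (hn, hl, wc)
  | c :: rest, hn, hl, wc, prevSpace =>
    let hn' := if PySem.Chars.isdigit c then true else hn
    let hl' := if PySem.Chars.isalpha c then true else hl
    let sp := PySem.Chars.isspace c
    let wc' := if !sp && prevSpace then wc + 1 else wc
    pvAltLoop rest hn' hl' wc' sp

def is_plausible_address_alt (address : String) : Bool :=
  if PySem.Str.len address < 10 then false
  else
    let r := pvAltLoop address.toList false false 0 true
    if !r.1 || !r.2.1 then false
    else if r.2.2 ≥ 3 then true
    else decide (PySem.Str.len address > 15)

-- ===== PRECONDITION & SPEC =====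
def Spec_is_plausible_address (address : String) (out : Bool) : Prop := out = is_plausible_address_alt address
instance (address : String) (out : Bool) : Decidable (Spec_is_plausible_address address out) := by unfold Spec_is_plausible_address; infer_instance

-- ===== CLAIM (what is proved, stated in full; the proofs are below) =====
def Claim_equal_is_plausible_address : Prop := ∀ (address : String), Dom_is_plausible_address address → Spec_is_plausible_address address (is_plausible_address address)

-- ===== LEMMAS AND PROOFS =====

-- word count of l given whether the previous character was whitespace (true at the start)
def pvWCount : List Char → Bool → Nat
  | [], _ => 0
  | c :: rest, prevSpace =>
    (if !(PySem.Chars.isspace c) && prevSpace then 1 else 0) + pvWCount rest (PySem.Chars.isspace c)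

theorem pvAltLoop_eq (l : List Char) : ∀ (hn hl : Bool) (wc : Nat) (p : Bool),
    pvAltLoop l hn hl wc p =
      (hn || l.any PySem.Chars.isdigit, hl || l.any PySem.Chars.isalpha, wc + pvWCount l p) := by
  induction l with
  | nil => intro hn hl wc p; simp [pvAltLoop, pvWCount]
  | cons c rest ih =>
    intro hn hl wc p
    simp only [pvAltLoop, ih, pvWCount, List.any_cons, Prod.mk.injEq]
    refine ⟨?_, ?_, ?_⟩
    · cases PySem.Chars.isdigit c <;> simp
    · cases PySem.Chars.isalpha c <;> simp
    · split_ifs <;> omega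

theorem split₀_go_length (l : List Char) : ∀ (cur : List Char) (acc : List (List Char)),
    (PySem.Chars.split₀.go l cur acc).length =
      acc.length + (if cur.isEmpty then 0 else 1) + pvWCount l cur.isEmpty := by
  induction l with
  | nil =>
    intro cur acc
    cases cur <;> simp [PySem.Chars.split₀.go, pvWCount]
  | cons c rest ih =>
    intro cur acc
    by_cases hs : PySem.Chars.isspace c = true
    · cases cur with
      | nil => simp [PySem.Chars.split₀.go, hs, ih, pvWCount]
      | cons a b => simp [PySem.Chars.split₀.go, hs, ih, pvWCount]
    · cases cur with
      | nil =>
        simp [PySem.Chars.split₀.go, hs, ih, pvWCount]; omega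
      | cons a b =>
        simp [PySem.Chars.split₀.go, hs, ih, pvWCount]

theorem split₀_length (s : String) :
    (PySem.Str.split₀ s).length = pvWCount s.toList true := by
  simp [PySem.Str.split₀, PySem.Chars.split₀, split₀_go_length]

-- ===== VERDICT (by name: the statement is the Claim_ definition above) =====
theorem is_plausible_address_spec : Claim_equal_is_plausible_address := by
  intro address _
  unfold Spec_is_plausible_address is_plausible_address is_plausible_address_alt
  rw [pvAltLoop_eq, ← split₀_length]
  simp
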